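-- pv_equiv track=rewrite | github.com/TechnicalJin/pitchmind | cricdata_live.py | normalize_team_to_dataset
-- ===== SOURCE A (Python) =====
-- from typing import Any, Dict, List, Optional, Tuple
--
-- def normalize_team_to_dataset(api_name: str, candidates: List[str]) -> str:
--     """Map CricAPI team label to a name from master_features team list."""
--     if not api_name:
--         return ""
--     n = api_name.strip().lower()
--     for c in candidates:
--         if c.lower() == n:
--             return c
--     for c in candidates:
--         cl = c.lower()
--         if n in cl or cl in n:
--             return c
--     # Title-style fallback aligned with dataset (mostly lowercase in CSV)
--     return api_name.strip().lower()
-- ===== SOURCE B (Python) =====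
-- def normalize_team_to_dataset(api_name, candidates):
--     """Score every candidate (0 = exact lowercase match, 1 = substring
--     containment either way, 2 = no match) and select the candidate with the
--     lowest rank, earliest index breaking ties; no staged scans."""
--     if not api_name:
--         return ""
--     n = api_name.strip().lower()
--
--     def rank(c):
--         cl = c.lower()
--         if cl == n:
--             return 0
--         if n in cl or cl in n:
--             return 1
--         return 2
--
--     best_rank, best = 2, None
--     for c in candidates:
--         r = rank(c)
--         if r < best_rank:
--             best_rank, best = r, c
--     return best if best is not None else n
-- ===== Notes on version B (the rewrite author's own statement) =====
-- stated objective: alternative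
-- what changed: Replaced A's two sequential scans (exact-match pass, then substring pass) by a rank-and-select algorithm: each candidate gets a match rank (0 exact, 1 substring, 2 none) and one fold keeps the lowest-ranked earliest candidate.
import Mathlib
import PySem

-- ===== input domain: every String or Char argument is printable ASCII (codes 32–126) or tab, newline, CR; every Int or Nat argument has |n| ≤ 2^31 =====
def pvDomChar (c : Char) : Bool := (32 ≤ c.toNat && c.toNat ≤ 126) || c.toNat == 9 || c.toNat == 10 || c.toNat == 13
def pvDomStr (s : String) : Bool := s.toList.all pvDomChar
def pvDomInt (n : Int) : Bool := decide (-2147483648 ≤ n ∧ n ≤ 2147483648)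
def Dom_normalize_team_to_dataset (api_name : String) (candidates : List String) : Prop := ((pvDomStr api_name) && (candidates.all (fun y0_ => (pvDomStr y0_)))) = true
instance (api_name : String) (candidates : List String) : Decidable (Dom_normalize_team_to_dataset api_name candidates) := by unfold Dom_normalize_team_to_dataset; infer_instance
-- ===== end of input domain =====

-- B replaces A's two staged scans by a rank-and-select fold (rank 0 exact, 1 substring, 2 none; lowest rank, earliest index wins); objective: alternative.


-- ===== PORT A =====
-- first for-loop: return the first candidate whose lowercase equals n
def ntdExactScan (n : String) : List String → Option String
  | [] => none
  | c :: rest => if PySem.Str.lower c == n then some c else ntdExactScan n rest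

-- second for-loop: return the first candidate with substring containment either way
def ntdSubScan (n : String) : List String → Option String
  | [] => none
  | c :: rest =>
    if PySem.Str.isIn n (PySem.Str.lower c) || PySem.Str.isIn (PySem.Str.lower c) n then some c
    else ntdSubScan n rest

def normalize_team_to_dataset (api_name : String) (candidates : List String) : String :=
  if api_name == "" then ""
  else
    let n := PySem.Str.lower (PySem.Str.strip api_name)
    match ntdExactScan n candidates with
    | some c => c
    | none =>
      match ntdSubScan n candidates with
      | some c => c
      | none => PySem.Str.lower (PySem.Str.strip api_name)

-- ===== PORT B =====
-- rank of a candidate: 0 exact lowercase match, 1 substring containment, 2 none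
def ntdRank (n c : String) : Nat :=
  let cl := PySem.Str.lower c
  if cl == n then 0
  else if PySem.Str.isIn n cl || PySem.Str.isIn cl n then 1
  else 2

-- the fold: keep the lowest-ranked candidate, earliest index breaking ties
def ntdBest (n : String) : List String → Nat × Option String → Nat × Option String
  | [], acc => acc
  | c :: rest, (br, b) =>
      let r := ntdRank n c
      if r < br then ntdBest n rest (r, some c) else ntdBest n rest (br, b)

def normalize_team_to_dataset_alt (api_name : String) (candidates : List String) : String :=
  if api_name == "" then ""
  else
    let n := PySem.Str.lower (PySem.Str.strip api_name)
    match (ntdBest n candidates (2, none)).2 with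
    | some c => c
    | none => n

-- ===== PRECONDITION & SPEC =====
def Spec_normalize_team_to_dataset (api_name : String) (candidates : List String) (out : String) : Prop := out = normalize_team_to_dataset_alt api_name candidates
instance (api_name : String) (candidates : List String) (out : String) : Decidable (Spec_normalize_team_to_dataset api_name candidates out) := by unfold Spec_normalize_team_to_dataset; infer_instance

-- ===== CLAIM (what is proved, stated in full; the proofs are below) =====
def Claim_equal_normalize_team_to_dataset : Prop := ∀ (api_name : String) (candidates : List String), Dom_normalize_team_to_dataset api_name candidates → Spec_normalize_team_to_dataset api_name candidates (normalize_team_to_dataset api_name candidates)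

-- ===== LEMMAS AND PROOFS =====
-- Once rank 0 is stored, nothing can beat it.
theorem ntdBest_zero (n : String) (cs : List String) : ∀ b, ntdBest n cs (0, b) = (0, b) := by
  induction cs with
  | nil => intro b; rfl
  | cons c rest ih =>
    intro b
    simp only [ntdBest]
    rw [if_neg (by omega), ih]

-- With rank 1 stored, only a later exact match can replace the accumulator.
theorem ntdBest_one (n : String) (cs : List String) : ∀ b,
    ntdBest n cs (1, b) =
      match ntdExactScan n cs with
      | some c => (0, some c)
      | none => (1, b) := by
  induction cs with
  | nil => intro b; rfl
  | cons c rest ih =>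
    intro b
    simp only [ntdBest, ntdExactScan, ntdRank]
    cases hx : (PySem.Str.lower c == n) with
    | true =>
      simp only [if_true]
      rw [if_pos (by omega), ntdBest_zero]
    | false =>
      simp only [Bool.false_eq_true, if_false]
      cases hs : (PySem.Str.isIn n (PySem.Str.lower c) || PySem.Str.isIn (PySem.Str.lower c) n) with
      | true =>
        simp only [if_true]
        rw [if_neg (by omega), ih]
      | false =>
        simp only [Bool.false_eq_true, if_false]
        rw [if_neg (by omega), ih]

-- From the initial state the fold computes exactly A's two staged scans.
theorem ntdBest_two (n : String) (cs : List String) : ∀ b,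
    ntdBest n cs (2, b) =
      match ntdExactScan n cs with
      | some c => (0, some c)
      | none =>
        match ntdSubScan n cs with
        | some c => (1, some c)
        | none => (2, b) := by
  induction cs with
  | nil => intro b; rfl
  | cons c rest ih =>
    intro b
    simp only [ntdBest, ntdExactScan, ntdSubScan, ntdRank]
    cases hx : (PySem.Str.lower c == n) with
    | true =>
      simp only [if_true]
      rw [if_pos (by omega), ntdBest_zero]
    | false =>
      simp only [Bool.false_eq_true, if_false]
      cases hs : (PySem.Str.isIn n (PySem.Str.lower c) || PySem.Str.isIn (PySem.Str.lower c) n) with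
      | true =>
        simp only [if_true]
        rw [if_pos (by omega), ntdBest_one]
      | false =>
        simp only [Bool.false_eq_true, if_false]
        rw [if_neg (by omega), ih]

-- ===== VERDICT (by name: the statement is the Claim_ definition above) =====
theorem normalize_team_to_dataset_spec : Claim_equal_normalize_team_to_dataset := by
  intro api_name candidates _
  unfold Spec_normalize_team_to_dataset normalize_team_to_dataset normalize_team_to_dataset_alt
  by_cases h : api_name == ""
  · simp [h]
  · simp only [h, ntdBest_two]
    cases ntdExactScan (PySem.Str.lower (PySem.Str.strip api_name)) candidates with
    | some c => rfl
    | none =>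
      cases ntdSubScan (PySem.Str.lower (PySem.Str.strip api_name)) candidates with
      | some c => rfl
      | none => rfl
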